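-- pv_equiv track=rewrite | github.com/Anbionchik/Git_brain_lessons | Lesson4/Exercise2.py | second_list_generator
-- ===== SOURCE A (Python) =====
-- def second_list_generator(first_list):
--     previous_value = None
--
--     for i in first_list:
--         if previous_value is None or i <= previous_value:
--             previous_value = i
--         else:
--             previous_value = i
--             yield i
-- ===== SOURCE B (Python) =====
-- def second_list_generator(first_list):
--     # Materialize, collect qualifying elements back-to-front by index, then
--     # reverse and yield. (Not lazy like A; return sequence is identical.)
--     xs = list(first_list)
--     out = []
--     for k in range(len(xs) - 1, 0, -1):
--         if not (xs[k] <= xs[k - 1]):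
--             out.append(xs[k])
--     out.reverse()
--     yield from out
-- ===== Notes on version B (the rewrite author's own statement) =====
-- stated objective: alternative
-- what changed: Replaces A's forward single pass carrying a previous_value sentinel with a backward index loop over the materialized list that collects qualifying elements back-to-front and reverses the result before yielding.
import Mathlib
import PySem

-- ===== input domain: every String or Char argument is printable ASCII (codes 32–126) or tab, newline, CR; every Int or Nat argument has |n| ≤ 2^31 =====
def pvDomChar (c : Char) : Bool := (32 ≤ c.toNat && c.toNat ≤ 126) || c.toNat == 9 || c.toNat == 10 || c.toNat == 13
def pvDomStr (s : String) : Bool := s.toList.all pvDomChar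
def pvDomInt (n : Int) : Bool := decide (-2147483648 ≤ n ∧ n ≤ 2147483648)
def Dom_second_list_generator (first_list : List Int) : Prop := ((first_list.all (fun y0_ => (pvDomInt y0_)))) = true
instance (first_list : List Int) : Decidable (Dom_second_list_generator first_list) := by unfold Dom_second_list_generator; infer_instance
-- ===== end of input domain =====

-- B replaces A's forward sentinel-state pass with a backward index loop collecting back-to-front, then a reverse;
-- same yielded sequence (B is not lazy, unlike A's generator; return-value equivalence only).
-- ===== PORT A =====
-- loop of A: carries previous_value (Option Int = None sentinel), yields i when prev is some p and not (i <= p)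
def pvGoA (first_list : List Int) (previous_value : Option Int) : List Int :=
  match first_list with
  | [] => []
  | i :: rest =>
    match previous_value with
    | none => pvGoA rest (some i)
    | some p => if i ≤ p then pvGoA rest (some i) else i :: pvGoA rest (some i)

def second_list_generator (first_list : List Int) : List Int :=
  pvGoA first_list none

-- ===== PORT B =====
-- for k in range(len(xs)-1, 0, -1): if not (xs[k] <= xs[k-1]): out.append(xs[k]); out.reverse()
-- indices k and k-1 are always in range here, so pyGetD is exact for xs[k] / xs[k-1]
def second_list_generator_alt (first_list : List Int) : List Int :=
  ((PySem.List.pyRange ((first_list.length : Int) - 1) 0 (-1)).foldl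
    (fun out k =>
      if !(PySem.List.pyGetD first_list k 0 ≤ PySem.List.pyGetD first_list (k - 1) 0) then
        out ++ [PySem.List.pyGetD first_list k 0]
      else out) []).reverse

-- ===== PRECONDITION & SPEC =====
def Spec_second_list_generator (first_list : List Int) (out : List Int) : Prop := out = second_list_generator_alt first_list
instance (first_list : List Int) (out : List Int) : Decidable (Spec_second_list_generator first_list out) := by unfold Spec_second_list_generator; infer_instance

-- ===== CLAIM =====
def Claim_equal_second_list_generator : Prop := ∀ (first_list : List Int), Dom_second_list_generator first_list → Spec_second_list_generator first_list (second_list_generator first_list)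

-- ===== LEMMAS AND PROOFS =====

-- A equals the consecutive-pair filter (characterisation of A's loop)
theorem pvGoA_eq (rest : List Int) : ∀ p : Int,
    pvGoA rest (some p) = (((p :: rest).zip rest).filter (fun pc => !(pc.2 ≤ pc.1))).map Prod.snd := by
  induction rest with
  | nil => intro p; simp [pvGoA]
  | cons i rest ih =>
    intro p
    by_cases h : i ≤ p
    · simp [pvGoA, List.zip, h, ih i]
    · simp [pvGoA, List.zip, h, ih i]

-- the forward index range 1..n-1 mapped to (xs[k-1], xs[k]) is exactly the consecutive-pair zip
theorem map_pyRange_eq_zip (xs : List Int) :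
    (PySem.List.pyRange 1 (xs.length : Int) 1).map
        (fun k => (PySem.List.pyGetD xs (k - 1) 0, PySem.List.pyGetD xs k 0))
      = xs.zip xs.tail := by
  rw [PySem.List.pyRange_one]
  apply List.ext_getElem
  · simp [List.length_zip, List.length_tail]
  · intro j h1 h2
    simp only [List.getElem_map, List.getElem_range, List.getElem_zip]
    have hlen : ((xs.length : Int) - 1).toNat = xs.length - 1 := by omega
    simp only [List.length_map, List.length_range, hlen] at h1
    have hj1 : j < xs.length := by omega
    have hj2 : j + 1 < xs.length := by omega
    have e1 : (1 : Int) + (j : Int) - 1 = ((j : Nat) : Int) := by omega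
    have e2 : (1 : Int) + (j : Int) = (((j + 1 : Nat)) : Int) := by push_cast; omega
    rw [e1, e2, PySem.List.pyGetD_natCast, PySem.List.pyGetD_natCast]
    simp [List.getD_eq_getElem?_getD, List.getElem?_eq_getElem hj1,
      List.getElem?_eq_getElem hj2, List.getElem_tail]

-- ===== VERDICT =====
theorem second_list_generator_spec : Claim_equal_second_list_generator := by
  intro xs _
  unfold Spec_second_list_generator second_list_generator second_list_generator_alt
  rw [PySem.List.foldl_append_if, PySem.List.pyRange_neg_one_eq_reverse]
  simp only [List.nil_append, zero_add, sub_add_cancel]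
  rw [List.filter_reverse, List.map_reverse, List.reverse_reverse]
  have key : ((PySem.List.pyRange 1 (xs.length : Int) 1).filter
        (fun k => !(PySem.List.pyGetD xs k 0 ≤ PySem.List.pyGetD xs (k - 1) 0))).map
        (fun k => PySem.List.pyGetD xs k 0)
      = ((xs.zip xs.tail).filter (fun pc => !(pc.2 ≤ pc.1))).map Prod.snd := by
    rw [← map_pyRange_eq_zip xs, List.filter_map, List.map_map]
    rfl
  rw [key]
  cases xs with
  | nil => simp [pvGoA]
  | cons a rest => simpa [pvGoA] using pvGoA_eq rest a
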